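-- pv_equiv track=rewrite | github.com/yasufumi-nakata/Pytra | src/toolchain/link/runtime_template_specializer.py | _encode_type_name
-- ===== SOURCE A (Python) =====
-- def _encode_type_name(text: str) -> str:
--     out_chars: list[str] = []
--     prev_us = False
--     for ch in text:
--         if ch.isalnum():
--             out_chars.append(ch)
--             prev_us = False
--             continue
--         if not prev_us:
--             out_chars.append("_")
--         prev_us = True
--     encoded = "".join(out_chars).strip("_")
--     return encoded if encoded != "" else "type"
-- ===== SOURCE B (Python) =====
-- def _encode_type_name(text: str) -> str:
--     mapped = ''.join(c if c.isalnum() else '_' for c in text)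
--     encoded = '_'.join(filter(None, mapped.split('_')))
--     return encoded if encoded != '' else 'type'
-- ===== Notes on version B (the rewrite author's own statement) =====
-- stated objective: simpler
-- what changed: Replaces A's single stateful loop (prev_us flag, append-or-skip, then strip) by a two-pass pipeline: map every non-alphanumeric char to '_', then split on '_', drop empty pieces and rejoin, which collapses runs and strips edges at once.
import Mathlib
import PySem

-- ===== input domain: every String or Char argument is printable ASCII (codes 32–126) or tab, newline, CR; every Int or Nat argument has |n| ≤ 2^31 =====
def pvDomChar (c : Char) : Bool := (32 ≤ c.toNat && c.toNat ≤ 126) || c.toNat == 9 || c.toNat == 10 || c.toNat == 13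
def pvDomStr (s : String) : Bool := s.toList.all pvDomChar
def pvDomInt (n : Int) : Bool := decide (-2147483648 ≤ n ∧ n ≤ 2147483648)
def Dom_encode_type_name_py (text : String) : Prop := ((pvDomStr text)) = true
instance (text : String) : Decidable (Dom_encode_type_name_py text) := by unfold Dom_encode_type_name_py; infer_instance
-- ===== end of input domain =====

-- B replaces A's stateful character loop (prev_us flag + final strip) by a map / split / filter / join pipeline; objective: simpler.

-- ===== PORT A =====
def encode_type_name_py (text : String) : String :=
  let st := text.toList.foldl
    (fun (st : List Char × Bool) ch =>
      if PySem.Chars.isalnum ch then (st.1 ++ [ch], false)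
      else if st.2 = false then (st.1 ++ ['_'], true)
      else (st.1, true))
    ([], false)
  let encoded := PySem.Chars.stripChars st.1 ['_']
  if encoded ≠ [] then String.ofList encoded else "type"

-- ===== PORT B =====
def encode_type_name_py_alt (text : String) : String :=
  let mapped := text.toList.map (fun c => if PySem.Chars.isalnum c then c else '_')
  let encoded := PySem.Chars.join ['_'] ((mapped.splitOn '_').filter (fun t => t ≠ []))
  if encoded ≠ [] then String.ofList encoded else "type"

-- ===== PRECONDITION & SPEC =====
def Spec_encode_type_name_py (text : String) (out : String) : Prop := out = encode_type_name_py_alt text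
instance (text : String) (out : String) : Decidable (Spec_encode_type_name_py text out) := by unfold Spec_encode_type_name_py; infer_instance

-- ===== CLAIM (what is proved, stated in full; the proofs are below) =====
def Claim_equal_encode_type_name_py : Prop := ∀ (text : String), Dom_encode_type_name_py text → Spec_encode_type_name_py text (encode_type_name_py text)

-- ===== LEMMAS AND PROOFS =====

-- A's loop in direct recursive form: collapse runs of non-alnum chars to single '_' (skipped while prev = true).
def pvCollapse : List Char → Bool → List Char
  | [], _ => []
  | c :: cs, prev =>
    if PySem.Chars.isalnum c then c :: pvCollapse cs false
    else if prev then pvCollapse cs true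
    else '_' :: pvCollapse cs true

-- B's token list: maximal alnum runs.
def pvTok (cs : List Char) : List (List Char) :=
  ((cs.map (fun c => if PySem.Chars.isalnum c then c else '_')).splitOn '_').filter (fun t => t ≠ [])

-- join with a single '_' in direct recursive form
def pvJ : List (List Char) → List Char
  | [] => []
  | [t] => t
  | t :: ts => t ++ '_' :: pvJ ts

-- trailing '_' of pvCollapse: present iff some alnum char exists and the last char is not alnum
def pvTail (cs : List Char) : Bool :=
  cs.any PySem.Chars.isalnum && !(PySem.Chars.isalnum ((cs.getLast?).getD 'a'))

def pvE (cs : List Char) : List Char := if pvTail cs then ['_'] else []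

theorem pvAl_ne_us {c : Char} (h : PySem.Chars.isalnum c = true) : (c == '_') = false := by
  by_cases hc : c = '_'
  · subst hc; exact absurd h (by decide)
  · simp [hc]

theorem pvContains_eq (c : Char) : (['_'].contains c) = (c == '_') := by
  cases h : c == '_' <;> simp [List.contains, List.elem, h]

theorem pv_fold (cs : List Char) : ∀ (acc : List Char) (prev : Bool),
    (cs.foldl (fun (st : List Char × Bool) ch =>
      if PySem.Chars.isalnum ch then (st.1 ++ [ch], false)
      else if st.2 = false then (st.1 ++ ['_'], true)
      else (st.1, true)) (acc, prev)).1 = acc ++ pvCollapse cs prev := by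
  induction cs with
  | nil => intro acc prev; simp [pvCollapse]
  | cons c cs ih =>
    intro acc prev
    by_cases h : PySem.Chars.isalnum c = true
    · simp [h, pvCollapse, ih]
    · cases prev <;> simp [h, pvCollapse, ih]

theorem pv_dropWhile_collapse_true (cs : List Char) :
    List.dropWhile (fun c => c == '_') (pvCollapse cs true) = pvCollapse cs true := by
  induction cs with
  | nil => simp [pvCollapse]
  | cons c cs ih =>
    by_cases h : PySem.Chars.isalnum c = true
    · simp [pvCollapse, h, pvAl_ne_us h]
    · simp [pvCollapse, h, ih]

theorem pv_dropWhile_collapse_false (cs : List Char) :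
    List.dropWhile (fun c => c == '_') (pvCollapse cs false) = pvCollapse cs true := by
  cases cs with
  | nil => simp [pvCollapse]
  | cons c cs =>
    by_cases h : PySem.Chars.isalnum c = true
    · simp [pvCollapse, h, pvAl_ne_us h]
    · simp [pvCollapse, h, pv_dropWhile_collapse_true]

theorem pv_splitOn_ne_nil (xs : List Char) : xs.splitOn '_' ≠ [] := by
  simp only [List.splitOn]
  exact List.splitOnP_ne_nil _ xs

theorem pv_split_us (xs : List Char) : ('_' :: xs).splitOn '_' = [] :: xs.splitOn '_' := by
  simp [List.splitOn, List.splitOnP_cons]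

theorem pv_split_ne {c : Char} (h : (c == '_') = false) (xs : List Char) :
    (c :: xs).splitOn '_' = (xs.splitOn '_').modifyHead (List.cons c) := by
  simp [List.splitOn, List.splitOnP_cons, h]

theorem pv_splitOn_not_mem (xs : List Char) : ∀ t ∈ xs.splitOn '_', '_' ∉ t := by
  induction xs with
  | nil => simp [List.splitOn, List.splitOnP_nil]
  | cons c cs ih =>
    by_cases h : (c == '_') = true
    · have hc : c = '_' := by simpa using h
      subst hc
      rw [pv_split_us]
      intro t ht
      rcases List.mem_cons.1 ht with h1 | h1
      · subst h1; simp
      · exact ih t h1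
    · rw [pv_split_ne (by simpa using h)]
      obtain ⟨p, rest, hp⟩ := List.exists_cons_of_ne_nil (pv_splitOn_ne_nil cs)
      rw [hp]
      intro t ht
      rcases List.mem_cons.1 ht with h1 | h1
      · subst h1
        intro hm
        rcases List.mem_cons.1 hm with h2 | h2
        · exact absurd h2.symm (by simpa using h)
        · exact ih p (by rw [hp]; exact List.mem_cons_self) h2
      · exact ih t (by rw [hp]; exact List.mem_cons_of_mem _ h1)

theorem pvTok_nil : pvTok [] = [] := by
  simp [pvTok, List.splitOn, List.splitOnP_nil]

theorem pvTok_cons_nonal {c : Char} (h : PySem.Chars.isalnum c = false) (cs : List Char) :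
    pvTok (c :: cs) = pvTok cs := by
  unfold pvTok
  rw [List.map_cons, if_neg (by simp [h]), pv_split_us, List.filter_cons]
  simp

theorem pvTok_cons_al {c : Char} (h : PySem.Chars.isalnum c = true) {cs : List Char}
    {p : List Char} {rest : List (List Char)}
    (hp : (cs.map (fun c => if PySem.Chars.isalnum c then c else '_')).splitOn '_' = p :: rest) :
    pvTok (c :: cs) = (c :: p) :: rest.filter (fun t => t ≠ []) := by
  unfold pvTok
  rw [List.map_cons, if_pos h, pv_split_ne (pvAl_ne_us h), hp, List.modifyHead, List.filter_cons]
  simp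

theorem pv_tok_nil_iff (cs : List Char) : pvTok cs = [] ↔ cs.any PySem.Chars.isalnum = false := by
  induction cs with
  | nil => simp [pvTok_nil]
  | cons c cs ih =>
    by_cases h : PySem.Chars.isalnum c = true
    · obtain ⟨p, rest, hp⟩ := List.exists_cons_of_ne_nil
        (pv_splitOn_ne_nil (cs.map (fun c => if PySem.Chars.isalnum c then c else '_')))
      rw [pvTok_cons_al h hp]
      simp [h]
    · have h' : PySem.Chars.isalnum c = false := by simpa using h
      rw [pvTok_cons_nonal h']
      simp [h', ih]

theorem pvJ_cons_cons (c : Char) (p : List Char) (ts : List (List Char)) :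
    pvJ ((c :: p) :: ts) = c :: pvJ (p :: ts) := by
  cases ts <;> simp [pvJ]

theorem pvJ_eq_join (ts : List (List Char)) : PySem.Chars.join ['_'] ts = pvJ ts := by
  induction ts with
  | nil => simp [PySem.Chars.join_nil, pvJ]
  | cons t ts ih =>
    cases ts with
    | nil => simp [PySem.Chars.join, List.intercalate, pvJ]
    | cons t' ts' =>
      rw [PySem.Chars.join_cons_cons, ih]
      simp [pvJ]

-- the main invariant: A's collapsed output is B's joined tokens plus a possible trailing '_'
theorem pv_main (cs : List Char) : pvCollapse cs true = pvJ (pvTok cs) ++ pvE cs := by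
  induction cs with
  | nil => simp [pvCollapse, pvTok_nil, pvJ, pvE, pvTail]
  | cons c cs ih =>
    by_cases h : PySem.Chars.isalnum c = true
    · -- alnum head
      cases cs with
      | nil =>
        rw [pvTok_cons_al h (show (([] : List Char).map _).splitOn '_' = [] :: [] from by
          simp [List.splitOn, List.splitOnP_nil])]
        simp [pvCollapse, h, pvJ, pvE, pvTail]
      | cons d cs' =>
        by_cases hd : PySem.Chars.isalnum d = true
        · -- next char alnum: collapse (c::d::cs') true = c :: collapse (d::cs') true
          have hcol : pvCollapse (c :: d :: cs') true = c :: pvCollapse (d :: cs') true := by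
            simp [pvCollapse, h, hd]
          obtain ⟨p, rest, hp⟩ := List.exists_cons_of_ne_nil
            (pv_splitOn_ne_nil (cs'.map (fun c => if PySem.Chars.isalnum c then c else '_')))
          have hp2 : ((d :: cs').map (fun c => if PySem.Chars.isalnum c then c else '_')).splitOn '_'
              = (d :: p) :: rest := by
            rw [List.map_cons, if_pos hd, pv_split_ne (pvAl_ne_us hd), hp, List.modifyHead]
          have hE : pvE (c :: d :: cs') = pvE (d :: cs') := by
            simp [pvE, pvTail, List.any_cons, List.getLast?_cons_cons, hd]
          rw [hcol, ih, pvTok_cons_al h hp2, pvTok_cons_al hd hp, hE]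
          simp [pvJ_cons_cons]
        · -- next char not alnum
          have hd' : PySem.Chars.isalnum d = false := by simpa using hd
          have hcol : pvCollapse (c :: d :: cs') true = c :: '_' :: pvCollapse cs' true := by
            simp [pvCollapse, h, hd']
          have hcol2 : pvCollapse (d :: cs') true = pvCollapse cs' true := by
            simp [pvCollapse, hd']
          have hp2 : ((d :: cs').map (fun c => if PySem.Chars.isalnum c then c else '_')).splitOn '_'
              = [] :: (cs'.map (fun c => if PySem.Chars.isalnum c then c else '_')).splitOn '_' := by
            rw [List.map_cons, if_neg (by simp [hd']), pv_split_us]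
          have htok : pvTok (c :: d :: cs') = [c] :: pvTok (d :: cs') := by
            rw [pvTok_cons_al h hp2, pvTok_cons_nonal hd']
            rfl
          rcases htd : pvTok (d :: cs') with _ | ⟨t, ts⟩
          · -- no alnum at all in d::cs'
            have hany : (d :: cs').any PySem.Chars.isalnum = false := (pv_tok_nil_iff _).1 htd
            have hE2 : pvE (d :: cs') = [] := by simp [pvE, pvTail, hany]
            have hlast : PySem.Chars.isalnum (((d :: cs').getLast?).getD 'a') = false := by
              cases hgl : (d :: cs').getLast? with
              | none => simp at hgl
              | some x =>
                have hxm : x ∈ d :: cs' := List.mem_of_getLast? hgl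
                simpa using List.any_eq_false.1 hany x hxm
            have hE1 : pvE (c :: d :: cs') = ['_'] := by
              have : pvTail (c :: d :: cs') = true := by
                simp only [pvTail, List.any_cons, h, Bool.true_or,
                  List.getLast?_cons_cons, Bool.true_and]
                simpa [List.getLast?_cons_cons] using congrArg Bool.not hlast
              simp [pvE, this]
            have ih' : pvCollapse cs' true = pvJ (pvTok (d :: cs')) ++ pvE (d :: cs') :=
              hcol2.symm.trans ih
            rw [hcol, ih', htd, htok, htd, hE1, hE2]
            simp [pvJ]
          · have hany : (d :: cs').any PySem.Chars.isalnum = true := by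
              by_contra hna
              have := (pv_tok_nil_iff (d :: cs')).2 (by simpa using hna)
              simp [htd] at this
            have hE : pvE (c :: d :: cs') = pvE (d :: cs') := by
              simp [pvE, pvTail, List.any_cons, List.getLast?_cons_cons, hany]
            have ih' : pvCollapse cs' true = pvJ (pvTok (d :: cs')) ++ pvE (d :: cs') :=
              hcol2.symm.trans ih
            rw [hcol, ih', htd, htok, htd, hE]
            rw [show pvJ ([c] :: t :: ts) = c :: '_' :: pvJ (t :: ts) from by simp [pvJ]]
            simp
    · -- non-alnum head, prev = true: dropped
      have h' : PySem.Chars.isalnum c = false := by simpa using h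
      have hcol : pvCollapse (c :: cs) true = pvCollapse cs true := by simp [pvCollapse, h']
      have hE : pvE (c :: cs) = pvE cs := by
        cases cs with
        | nil => simp [pvE, pvTail, h']
        | cons d cs' => simp [pvE, pvTail, List.any_cons, List.getLast?_cons_cons, h']
      rw [hcol, ih, pvTok_cons_nonal h', hE]

theorem pv_no_trailing (ts : List (List Char)) (hts : ∀ t ∈ ts, t ≠ [] ∧ '_' ∉ t) :
    List.dropWhile (fun c => c == '_') (pvJ ts).reverse = (pvJ ts).reverse := by
  induction ts with
  | nil => simp [pvJ]
  | cons t ts ih =>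
    cases ts with
    | nil =>
      obtain ⟨hne, hnm⟩ := hts t (by simp)
      obtain ⟨x, xs, hx⟩ := List.exists_cons_of_ne_nil (show t.reverse ≠ [] by simpa using hne)
      have hxmem : x ∈ t := by
        have : x ∈ t.reverse := by rw [hx]; exact List.mem_cons_self
        simpa using this
      have hxne : (x == '_') = false := by
        simp only [beq_eq_false_iff_ne, ne_eq]
        intro he; exact hnm (he ▸ hxmem)
      simp [pvJ, hx, hxne]
    | cons t' ts' =>
      have hrec := ih (fun u hu => hts u (List.mem_cons_of_mem _ hu))
      have hne' : pvJ (t' :: ts') ≠ [] := by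
        obtain ⟨hne, _⟩ := hts t' (by simp)
        cases ts' <;> simp [pvJ, hne]
      obtain ⟨y, ys, hy⟩ := List.exists_cons_of_ne_nil
        (show (pvJ (t' :: ts')).reverse ≠ [] by simpa using hne')
      have hyne : (y == '_') = false := by
        have hthis := hrec
        rw [hy, List.dropWhile_cons] at hthis
        by_contra hcon
        simp only [Bool.not_eq_false] at hcon
        rw [if_pos hcon] at hthis
        have hlen := congrArg List.length hthis
        have := List.length_dropWhile_le (fun c => c == '_') ys
        simp at hlen
        omega
      have hJ : pvJ (t :: t' :: ts') = t ++ '_' :: pvJ (t' :: ts') := by simp [pvJ]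
      rw [hJ, List.reverse_append, List.reverse_cons]
      rw [show (pvJ (t' :: ts')).reverse ++ ['_'] ++ t.reverse
            = ((pvJ (t' :: ts')).reverse ++ ['_']) ++ t.reverse from by simp]
      rw [List.dropWhile_append]
      have h1 : List.dropWhile (fun c => c == '_') ((pvJ (t' :: ts')).reverse ++ ['_']) =
          (pvJ (t' :: ts')).reverse ++ ['_'] := by
        rw [hy]
        simp [hyne]
      rw [h1]
      have h2 : ((pvJ (t' :: ts')).reverse ++ ['_']).isEmpty = false := by simp
      simp [h2]

theorem pv_tok_props (cs : List Char) : ∀ t ∈ pvTok cs, t ≠ [] ∧ '_' ∉ t := by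
  intro t ht
  unfold pvTok at ht
  have h1 := List.of_mem_filter ht
  have h2 := List.mem_of_mem_filter ht
  exact ⟨by simpa using h1, pv_splitOn_not_mem _ t h2⟩

theorem pv_strip (cs : List Char) :
    PySem.Chars.stripChars (pvCollapse cs false) ['_'] = pvJ (pvTok cs) := by
  unfold PySem.Chars.stripChars
  have hq : (fun c => List.contains ['_'] c) = (fun c => c == '_') := by
    funext c; exact pvContains_eq c
  rw [hq]
  show (List.dropWhile (fun c => c == '_')
      (List.dropWhile (fun c => c == '_') (pvCollapse cs false)).reverse).reverse = pvJ (pvTok cs)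
  rw [pv_dropWhile_collapse_false, pv_main, List.reverse_append]
  have hE : List.dropWhile (fun c => c == '_') ((pvE cs).reverse ++ (pvJ (pvTok cs)).reverse)
      = (pvJ (pvTok cs)).reverse := by
    unfold pvE
    split
    · simp only [List.reverse_cons, List.reverse_nil, List.nil_append, List.cons_append]
      rw [List.dropWhile_cons, if_pos (by simp)]
      exact pv_no_trailing (pvTok cs) (pv_tok_props cs)
    · simp only [List.reverse_nil, List.nil_append]
      exact pv_no_trailing (pvTok cs) (pv_tok_props cs)
  rw [hE, List.reverse_reverse]

-- ===== VERDICT (by name: the statement is the Claim_ definition above) =====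
theorem encode_type_name_py_spec : Claim_equal_encode_type_name_py := by
  intro text _
  unfold Spec_encode_type_name_py encode_type_name_py encode_type_name_py_alt
  have hfold := pv_fold text.toList [] false
  simp only []
  rw [hfold]
  simp only [List.nil_append]
  rw [pv_strip, pvJ_eq_join]
  rfl
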